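-- pv_equiv track=rewrite | github.com/HackCodeMan/python-project | Number's properties.py | define_number_properties
-- ===== SOURCE A (Python) =====
-- def define_number_properties (number):
--     """define number properties"""
--     #How many digit?
--     num_of_symbol = len(str(number))
--     #Check number ends in zero or no
--     ends_in_zero = False
--     if (number % 10) == 0:
--         ends_in_zero = True
--     #What numbers in the range is a multiple of number
--     multiples = []
--     for i in range(number):
--         if (number % (i+1)) == 0:
--             multiples.append(str(i+1))
--     return num_of_symbol,ends_in_zero,multiples
-- ===== SOURCE B (Python) =====
-- def define_number_properties(number):
--     """define number properties"""
--     num_of_symbol = len(str(number))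
--     ends_in_zero = number % 10 == 0
--     small = []
--     large = []
--     i = 1
--     while i * i <= number:
--         if number % i == 0:
--             small.append(i)
--             q = number // i
--             if q != i:
--                 large.append(q)
--         i += 1
--     multiples = [str(d) for d in small] + [str(d) for d in reversed(large)]
--     return num_of_symbol, ends_in_zero, multiples
-- ===== Notes on version B (the rewrite author's own statement) =====
-- stated objective: faster
-- what changed: A scans all of range(number) testing number % (i+1) == 0; B trial-divides only up to √number, collecting each divisor i and its cofactor number//i, and returns the small divisors followed by the reversed cofactor list (same ascending order).
import Mathlib
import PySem

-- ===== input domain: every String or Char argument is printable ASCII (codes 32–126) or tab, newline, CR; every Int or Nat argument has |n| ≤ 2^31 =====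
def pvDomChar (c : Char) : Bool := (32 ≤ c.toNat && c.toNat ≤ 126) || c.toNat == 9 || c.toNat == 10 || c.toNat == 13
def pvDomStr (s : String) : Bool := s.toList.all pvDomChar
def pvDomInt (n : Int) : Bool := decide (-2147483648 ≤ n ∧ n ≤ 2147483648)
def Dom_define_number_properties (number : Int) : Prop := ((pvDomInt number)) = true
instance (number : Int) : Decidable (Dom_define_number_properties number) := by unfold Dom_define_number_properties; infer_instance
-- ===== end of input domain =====

-- B replaces A's O(n) scan of all of range(number) by trial division up to √number,
-- collecting each divisor pair (i, number//i); objective: faster (asymptotic O(√n)).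

-- ===== PORT A =====
def define_number_properties (number : Int) : Int × Bool × List String :=
  let num_of_symbol : Int := PySem.Str.len (PySem.Int.toStr number)
  let ends_in_zero : Bool := if PySem.Int.mod number 10 = 0 then true else false
  let multiples : List String := (PySem.List.pyRange 0 number 1).foldl
    (fun acc i => if PySem.Int.mod number (i + 1) = 0 then acc ++ [PySem.Int.toStr (i + 1)] else acc) []
  (num_of_symbol, ends_in_zero, multiples)

-- ===== PORT B =====
-- the 'while i*i <= number' loop of Source B (termination: i ≤ number while the guard holds)
def pvBLoop (number i : Int) (small large : List Int) : List Int × List Int :=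
  if h : i * i ≤ number then
    if PySem.Int.mod number i = 0 then
      let q := PySem.Int.floordiv number i
      if q ≠ i then pvBLoop number (i + 1) (small ++ [i]) (large ++ [q])
      else pvBLoop number (i + 1) (small ++ [i]) large
    else pvBLoop number (i + 1) small large
  else (small, large)
termination_by (number + 1 - i).toNat
decreasing_by
  all_goals
    (have h1 : 2 * i - 1 ≤ number := by nlinarith [sq_nonneg (i - 1)]
     have h2 : (0:Int) ≤ number := by nlinarith [sq_nonneg i]
     omega)

def define_number_properties_alt (number : Int) : Int × Bool × List String :=
  let num_of_symbol : Int := PySem.Str.len (PySem.Int.toStr number)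
  let ends_in_zero : Bool := decide (PySem.Int.mod number 10 = 0)
  let p := pvBLoop number 1 [] []
  let multiples : List String := p.1.map PySem.Int.toStr ++ (p.2.reverse).map PySem.Int.toStr
  (num_of_symbol, ends_in_zero, multiples)

-- ===== PRECONDITION & SPEC =====
def Spec_define_number_properties (number : Int) (out : Int × Bool × List String) : Prop := out = define_number_properties_alt number
instance (number : Int) (out : Int × Bool × List String) : Decidable (Spec_define_number_properties number out) := by unfold Spec_define_number_properties; infer_instance

-- ===== CLAIM (what is proved, stated in full; the proofs are below) =====
def Claim_equal_define_number_properties : Prop := ∀ (number : Int), Dom_define_number_properties number → Spec_define_number_properties number (define_number_properties number)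

-- ===== LEMMAS AND PROOFS =====

-- the square-root bound as an Int
def pvR (n : Int) : Int := (Nat.sqrt n.toNat : Int)

-- divisors of n in [i, pvR n], ascending
def pvSD (n i : Int) : List Int :=
  (PySem.List.pyRange i (pvR n + 1) 1).filter (fun d => decide (d ∣ n))

-- cofactors n/d of those divisors d with n/d ≠ d, in order of d
def pvLD (n i : Int) : List Int :=
  ((PySem.List.pyRange i (pvR n + 1) 1).filter (fun d => decide (d ∣ n ∧ n / d ≠ d))).map (fun d => n / d)

lemma pvR_sq_le (n : Int) (hn : 0 ≤ n) : pvR n * pvR n ≤ n := by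
  have h := Nat.sqrt_le' n.toNat
  have h2 : ((Nat.sqrt n.toNat : Nat) : Int) * (Nat.sqrt n.toNat : Int) ≤ (n.toNat : Int) := by
    have := h; rw [pow_two] at this; exact_mod_cast this
  simpa [pvR, Int.toNat_of_nonneg hn] using h2

lemma pvR_lt_succ_sq (n : Int) (hn : 0 ≤ n) : n < (pvR n + 1) * (pvR n + 1) := by
  have h := Nat.lt_succ_sqrt' n.toNat
  have h2 : ((n.toNat : Nat) : Int) < ((Nat.sqrt n.toNat : Int) + 1) * ((Nat.sqrt n.toNat : Int) + 1) := by
    have := h; rw [Nat.succ_eq_add_one, pow_two] at this; exact_mod_cast this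
  simpa [pvR, Int.toNat_of_nonneg hn] using h2

lemma pvR_nonneg (n : Int) : 0 ≤ pvR n := by simp [pvR]

lemma le_pvR_iff (n i : Int) (hn : 0 ≤ n) (hi : 0 ≤ i) : i ≤ pvR n ↔ i * i ≤ n := by
  have h1 := pvR_sq_le n hn
  have h2 := pvR_lt_succ_sq n hn
  have h3 := pvR_nonneg n
  constructor
  · intro h; nlinarith
  · intro h; nlinarith

lemma pvBLoop_spec (n : Int) (hn : 0 ≤ n) : ∀ (k : Nat) (i : Int), 1 ≤ i →
    (pvR n + 1 - i).toNat = k → ∀ small large,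
    pvBLoop n i small large = (small ++ pvSD n i, large ++ pvLD n i) := by
  intro k
  induction k with
  | zero =>
    intro i hi hk small large
    have hguard : ¬ (i * i ≤ n) := by
      intro h
      have := (le_pvR_iff n i hn (by omega)).2 h
      omega
    rw [pvBLoop]
    simp [hguard, pvSD, pvLD, PySem.List.pyRange_one_eq_nil (by omega : pvR n + 1 ≤ i)]
  | succ k ih =>
    intro i hi hk small large
    by_cases hguard : i * i ≤ n
    · have hir : i ≤ pvR n := (le_pvR_iff n i hn (by omega)).2 hguard
      have hcons : PySem.List.pyRange i (pvR n + 1) 1 = i :: PySem.List.pyRange (i + 1) (pvR n + 1) 1 :=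
        PySem.List.pyRange_one_cons (by omega)
      have hrec := ih (i + 1) (by omega) (by omega)
      rw [pvBLoop]
      by_cases hdvd : PySem.Int.mod n i = 0
      · have hdvd' : i ∣ n := (PySem.Int.mod_eq_zero_iff_dvd n i).1 hdvd
        have hq : PySem.Int.floordiv n i = n / i := PySem.Int.floordiv_eq_ediv_of_pos (by omega)
        by_cases hne : n / i ≠ i
        · simp only [dif_pos hguard, if_pos hdvd, hq, if_pos hne, hrec]
          simp [pvSD, pvLD, hcons, hdvd', hne, List.append_assoc]
        · simp only [dif_pos hguard, if_pos hdvd, hq, if_neg hne, hrec]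
          simp [pvSD, pvLD, hcons, hdvd', hne, List.append_assoc]
      · have hdvd' : ¬ i ∣ n := fun h => hdvd ((PySem.Int.mod_eq_zero_iff_dvd n i).2 h)
        simp only [dif_pos hguard, if_neg hdvd, hrec]
        simp [pvSD, pvLD, hcons, hdvd']
    · have hir : ¬ (i ≤ pvR n) := fun h => hguard ((le_pvR_iff n i hn (by omega)).1 h)
      rw [pvBLoop]
      simp [hguard, pvSD, pvLD, PySem.List.pyRange_one_eq_nil (by omega : pvR n + 1 ≤ i)]

-- two strictly increasing Int lists with the same members are equal
lemma pv_eq_lists (l₁ l₂ : List Int) (s₁ : l₁.Pairwise (· < ·)) (s₂ : l₂.Pairwise (· < ·))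
    (h : ∀ x, x ∈ l₁ ↔ x ∈ l₂) : l₁ = l₂ :=
  ((List.perm_ext_iff_of_nodup s₁.nodup s₂.nodup).2 h).eq_of_pairwise
    (fun _ _ _ _ hab hba => absurd hba (not_lt.2 hab.le)) s₁ s₂

-- basic facts about the cofactor n / d of a divisor d ≥ 1
lemma pvCof (n d : Int) (hn : 1 ≤ n) (hd : 1 ≤ d) (hdvd : d ∣ n) :
    1 ≤ n / d ∧ n / d ∣ n ∧ n / d ≤ n ∧ d * (n / d) = n := by
  obtain ⟨c, hc⟩ := hdvd
  have hd0 : d ≠ 0 := by omega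
  have hdc : n / d = c := by rw [hc]; exact Int.mul_ediv_cancel_left c hd0
  have hc1 : 1 ≤ c := by nlinarith
  refine ⟨by omega, ⟨d, by rw [hdc, hc]; ring⟩, by nlinarith, by rw [hdc, ← hc]⟩

-- a small divisor's cofactor (when distinct from it) exceeds √n
lemma pvBig (n d : Int) (hn : 1 ≤ n) (hd : 1 ≤ d) (hdr : d ≤ pvR n) (hdvd : d ∣ n)
    (hne : n / d ≠ d) : pvR n < n / d := by
  have hr1 := pvR_sq_le n (by omega)
  obtain ⟨h1, _, _, h4⟩ := pvCof n d hn hd hdvd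
  by_contra hle
  rw [not_lt] at hle
  have hr0 : (0:Int) < pvR n := by omega
  have e1 : d * (n / d) ≤ pvR n * (n / d) := by nlinarith
  have e2 : pvR n * (n / d) ≤ pvR n * pvR n := by nlinarith
  have e3 : pvR n * (n / d) = pvR n * pvR n := by omega
  have e4 : d * (n / d) = pvR n * (n / d) := by omega
  have e5 : n / d = pvR n := mul_left_cancel₀ (by omega) e3
  have e6 : d = pvR n := by
    have := mul_right_cancel₀ (b := n / d) (by omega) e4
    omega
  omega

-- cofactors are strictly antitone on divisors
lemma pvCofLt (n a b : Int) (hn : 1 ≤ n) (ha : 1 ≤ a) (hab : a < b) (hda : a ∣ n) (hdb : b ∣ n) :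
    n / b < n / a := by
  obtain ⟨ha1, _, _, ha4⟩ := pvCof n a hn ha hda
  obtain ⟨hb1, _, _, hb4⟩ := pvCof n b hn (by omega) hdb
  nlinarith

-- a divisor above √n is the cofactor of a divisor at most √n
lemma pvSmallCof (n x : Int) (hn : 1 ≤ n) (hx1 : 1 ≤ x) (hxr : pvR n < x) (hdvd : x ∣ n) :
    n / x ∣ n ∧ 1 ≤ n / x ∧ n / x ≤ pvR n ∧ n / (n / x) = x ∧ n / (n / x) ≠ n / x := by
  have hr2 := pvR_lt_succ_sq n (by omega)
  have hr0 := pvR_nonneg n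
  obtain ⟨h1, h2, _, h4⟩ := pvCof n x hn hx1 hdvd
  have hcx : n / x < x := by nlinarith
  have hback : n / (n / x) = x := by
    have h0 : n / x ≠ 0 := by omega
    set k := n / x with hk
    have hkx : n = k * x := by linarith [h4]
    rw [hkx, Int.mul_ediv_cancel_left x h0]
  have hler : n / x ≤ pvR n := by
    rw [le_pvR_iff n (n / x) (by omega) (by omega)]
    nlinarith
  exact ⟨h2, h1, hler, hback, by omega⟩

lemma pvMerge (n : Int) (hn : 1 ≤ n) :
    pvSD n 1 ++ (pvLD n 1).reverse =
      (PySem.List.pyRange 1 (n + 1) 1).filter (fun d => decide (d ∣ n)) := by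
  have hr1 := pvR_sq_le n (by omega)
  have hr2 := pvR_lt_succ_sq n (by omega)
  have hr0 : 1 ≤ pvR n := by
    rw [le_pvR_iff n 1 (by omega) (by omega)]; omega
  apply pv_eq_lists
  · -- strictly increasing
    rw [List.pairwise_append]
    refine ⟨(PySem.List.pairwise_lt_pyRange_one 1 (pvR n + 1)).filter _, ?_, ?_⟩
    · rw [List.pairwise_reverse]
      unfold pvLD
      rw [List.pairwise_map]
      refine ((PySem.List.pairwise_lt_pyRange_one 1 (pvR n + 1)).filter _).imp_of_mem ?_
      intro a b ha hb hab
      simp only [List.mem_filter, PySem.List.mem_pyRange_one, decide_eq_true_eq] at ha hb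
      exact pvCofLt n a b hn (by omega) hab ha.2.1 hb.2.1
    · intro a ha b hb
      simp only [pvSD, pvLD, List.mem_reverse, List.mem_map, List.mem_filter,
        PySem.List.mem_pyRange_one, decide_eq_true_eq] at ha hb
      obtain ⟨⟨ha1, har⟩, -⟩ := ha
      obtain ⟨d, ⟨⟨hd1, hdr⟩, hdvd, hne⟩, rfl⟩ := hb
      have := pvBig n d hn hd1 (by omega) hdvd hne
      omega
  · exact (PySem.List.pairwise_lt_pyRange_one 1 (n + 1)).filter _
  · -- same members: divisors of n in [1, n]
    intro x
    simp only [pvSD, pvLD, List.mem_append, List.mem_reverse, List.mem_map, List.mem_filter,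
      PySem.List.mem_pyRange_one, decide_eq_true_eq]
    constructor
    · rintro (⟨⟨hx1, hxr⟩, hdvd⟩ | ⟨d, ⟨⟨hd1, hdr⟩, hdvd, hne⟩, rfl⟩)
      · refine ⟨⟨hx1, ?_⟩, hdvd⟩
        nlinarith
      · obtain ⟨h1, h2, h3, _⟩ := pvCof n d hn hd1 hdvd
        exact ⟨⟨h1, by omega⟩, h2⟩
    · rintro ⟨⟨hx1, hxn⟩, hdvd⟩
      by_cases hxr : x ≤ pvR n
      · exact Or.inl ⟨⟨hx1, by omega⟩, hdvd⟩
      · right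
        obtain ⟨c2, c1, cr, cback, cne⟩ := pvSmallCof n x hn hx1 (by omega) hdvd
        exact ⟨n / x, ⟨⟨c1, by omega⟩, c2, by rw [cback]; omega⟩, cback⟩

lemma pvA_multiples (n : Int) :
    (PySem.List.pyRange 0 n 1).foldl
      (fun acc i => if PySem.Int.mod n (i + 1) = 0 then acc ++ [PySem.Int.toStr (i + 1)] else acc) []
    = ((PySem.List.pyRange 1 (n + 1) 1).filter (fun d => decide (d ∣ n))).map PySem.Int.toStr := by
  rw [PySem.List.foldl_append_ite]
  simp only [PySem.Int.mod_eq_zero_iff_dvd, PySem.List.pyRange_one, List.filter_map,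
    List.map_map, List.nil_append]
  have he : (n + 1 - 1).toNat = (n - 0).toNat := by omega
  rw [he]
  congr 1
  · funext k; simp [Int.add_comm]
  · congr 1; funext k; simp [Int.add_comm]

-- ===== VERDICT (by name: the statement is the Claim_ definition above) =====
theorem define_number_properties_spec : Claim_equal_define_number_properties := by
  intro number _
  unfold Spec_define_number_properties define_number_properties define_number_properties_alt
  simp only []
  refine Prod.ext rfl (Prod.ext ?_ ?_)
  · simp
  · by_cases hn : 1 ≤ number
    · have hb := pvBLoop_spec number (by omega) (pvR number + 1 - 1).toNat 1 (by omega) rfl [] []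
      rw [pvA_multiples, ← pvMerge number hn]
      simp [hb, List.map_append]
    · have hA : PySem.List.pyRange 0 number 1 = [] :=
        PySem.List.pyRange_one_eq_nil (by omega)
      have hB : pvBLoop number 1 [] [] = ([], []) := by
        rw [pvBLoop]
        simp only [show ¬ ((1:Int) * 1 ≤ number) by omega, dif_neg, not_false_iff]
      simp [hA, hB]
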